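-- pv_equiv track=rewrite | github.com/skar2019/quality-dashboard-2025 | ml_models/app/services/chatbot_service.py | _group_by_sprint
-- ===== SOURCE A (Python) =====
-- from typing import List, Dict, Any, Optional
--
-- def _group_by_sprint(items: List[Dict[str, Any]]) -> Dict[str, List[Dict[str, Any]]]:
--     """Group JIRA items by sprint"""
--     sprint_groups = {}
--     for item in items:
--         sprint = item.get('sprint', 'No Sprint')
--         if sprint not in sprint_groups:
--             sprint_groups[sprint] = []
--         sprint_groups[sprint].append(item)
--     return sprint_groups
-- ===== SOURCE B (Python) =====
-- from typing import List, Dict, Any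
--
-- def _group_by_sprint(items: List[Dict[str, Any]]) -> Dict[str, List[Dict[str, Any]]]:
--     """Group JIRA items by sprint (first-seen key order, then per-key rescan)."""
--     seen = []
--     for item in items:
--         sprint = item.get('sprint', 'No Sprint')
--         if sprint not in seen:
--             seen.append(sprint)
--     return {s: [i for i in items if i.get('sprint', 'No Sprint') == s] for s in seen}
-- ===== Notes on version B (the rewrite author's own statement) =====
-- stated objective: alternative
-- what changed: B replaces A's single-pass dict-building loop (append into a mutated group list per item) by two phases: one scan collecting the distinct sprint keys in first-seen order, then a dict comprehension that re-filters the whole item list once per key.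
import Mathlib
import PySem

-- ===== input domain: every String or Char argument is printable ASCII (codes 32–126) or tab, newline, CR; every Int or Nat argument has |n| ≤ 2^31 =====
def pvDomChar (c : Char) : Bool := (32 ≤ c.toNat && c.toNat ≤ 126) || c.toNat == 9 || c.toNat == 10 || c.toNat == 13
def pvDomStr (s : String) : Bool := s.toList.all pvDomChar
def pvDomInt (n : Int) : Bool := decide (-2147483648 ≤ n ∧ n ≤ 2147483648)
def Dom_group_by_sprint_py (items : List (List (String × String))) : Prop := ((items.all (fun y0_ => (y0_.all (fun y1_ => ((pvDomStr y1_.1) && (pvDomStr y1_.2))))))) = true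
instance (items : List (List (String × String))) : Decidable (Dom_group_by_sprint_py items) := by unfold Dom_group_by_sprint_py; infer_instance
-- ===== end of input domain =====

-- B: same grouping via a distinct-keys scan plus a per-key rescan of all items (alternative decomposition, not faster).

-- ===== PORT A =====
-- sprint = item.get('sprint', 'No Sprint')
def pvSprintKey (item : List (String × String)) : String :=
  (PySem.Dict.mk item).getD "sprint" "No Sprint"

def group_by_sprint_py (items : List (List (String × String))) : List (String × List (List (String × String))) :=
  (items.foldl
    (fun d item =>
      let s := pvSprintKey item
      -- if sprint not in sprint_groups: sprint_groups[sprint] = []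
      let d' := if d.contains s = true then d else d.insert s []
      -- sprint_groups[sprint].append(item)
      d'.insert s (d'.getD s [] ++ [item]))
    PySem.Dict.empty).items

-- ===== PORT B =====
def group_by_sprint_py_alt (items : List (List (String × String))) : List (String × List (List (String × String))) :=
  let seen := items.foldl
    (fun acc item =>
      let s := pvSprintKey item
      if s ∈ acc then acc else acc ++ [s]) []
  seen.map (fun s => (s, items.filter (fun i => pvSprintKey i == s)))

-- ===== PRECONDITION & SPEC =====
def Spec_group_by_sprint_py (items : List (List (String × String))) (out : List (String × List (List (String × String)))) : Prop := out = group_by_sprint_py_alt items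
instance (items : List (List (String × String))) (out : List (String × List (List (String × String)))) : Decidable (Spec_group_by_sprint_py items out) := by unfold Spec_group_by_sprint_py; infer_instance

-- ===== CLAIM (what is proved, stated in full; the proofs are below) =====
def Claim_equal_group_by_sprint_py : Prop := ∀ (items : List (List (String × String))), Dom_group_by_sprint_py items → Spec_group_by_sprint_py items (group_by_sprint_py items)

-- ===== LEMMAS AND PROOFS =====

-- PySem.Dict.modify literally is "insert the updated value".
theorem pv_modify_eq {ν : Type} (d : PySem.Dict String ν) (k : String) (dflt : ν) (f : ν → ν) :
    d.modify k dflt f = d.insert k (f (d.getD k dflt)) := rfl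

-- A's loop body is exactly a modify at the sprint key.
theorem pv_stepA_eq (d : PySem.Dict String (List (List (String × String)))) (item : List (String × String)) :
    (let s := pvSprintKey item
     let d' := if d.contains s = true then d else d.insert s []
     d'.insert s (d'.getD s [] ++ [item]))
    = d.modify (pvSprintKey item) [] (· ++ [item]) := by
  rw [pv_modify_eq]
  by_cases h : d.contains (pvSprintKey item) = true
  · simp [h]
  · simp only [h, Bool.false_eq_true, if_false]
    rw [PySem.Dict.getD_insert_self, PySem.Dict.insert_insert_self,
      PySem.Dict.getD_of_not_contains]
    simpa using h

-- B's accumulator step is PySem.Set.add.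
theorem pv_stepB_eq (acc : List String) (item : List (String × String)) :
    (let s := pvSprintKey item
     if s ∈ acc then acc else acc ++ [s])
    = PySem.Set.add acc (pvSprintKey item) := by
  rw [PySem.Set.add_eq_ite]

theorem group_list_eq (items : List (List (String × String))) :
    group_by_sprint_py items
      = (PySem.Set.ofList (items.map pvSprintKey)).map
          (fun s => (s, items.filter (fun i => pvSprintKey i == s))) := by
  unfold group_by_sprint_py
  have hstep : (items.foldl
      (fun d item =>
        let s := pvSprintKey item
        let d' := if d.contains s = true then d else d.insert s []
        d'.insert s (d'.getD s [] ++ [item]))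
      PySem.Dict.empty)
      = (items.map (fun i => (pvSprintKey i, i))).foldl
          (fun d p => d.modify p.1 [] (· ++ [p.2])) PySem.Dict.empty := by
    rw [List.foldl_map]
    apply PySem.List.foldl_congr_mem
    intro d item _
    exact pv_stepA_eq d item
  rw [hstep]
  set pairs := items.map (fun i => (pvSprintKey i, i)) with hpairs
  set D := pairs.foldl (fun d p => d.modify p.1 [] (· ++ [p.2])) PySem.Dict.empty with hD
  have hnd : D.keys.Nodup := by
    rw [hD]
    exact PySem.Dict.nodup_keys_foldl_modify_key pairs Prod.fst [] (fun _ p => (· ++ [p.2])) _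
      PySem.Dict.nodup_keys_empty
  rw [PySem.Dict.items_eq_map_keys D hnd []]
  have hkeys : D.keys = PySem.Set.ofList (items.map pvSprintKey) := by
    rw [hD]
    rw [PySem.Dict.keys_foldl_modify_key]
    simp only [PySem.Dict.keys_empty, PySem.Set.update_nil_left, hpairs, List.map_map]
    rfl
  rw [hkeys]
  apply List.map_congr_left
  intro k _
  have hg : D.getD k [] = (items.filter (fun i => pvSprintKey i == k)).map id := by
    rw [hD, PySem.Dict.getD_foldl_modify_append, PySem.Dict.getD_empty]
    rw [hpairs, List.filter_map, List.map_map]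
    rfl
  rw [hg, List.map_id]

theorem alt_eq (items : List (List (String × String))) :
    group_by_sprint_py_alt items
      = (PySem.Set.ofList (items.map pvSprintKey)).map
          (fun s => (s, items.filter (fun i => pvSprintKey i == s))) := by
  unfold group_by_sprint_py_alt
  have hseen : items.foldl
      (fun acc item =>
        let s := pvSprintKey item
        if s ∈ acc then acc else acc ++ [s]) []
      = PySem.Set.ofList (items.map pvSprintKey) := by
    rw [← PySem.Set.update_nil_left, PySem.Set.update_map_eq_foldl_add]
    apply PySem.List.foldl_congr_mem
    intro acc item _
    exact pv_stepB_eq acc item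
  rw [hseen]

-- ===== VERDICT (by name: the statement is the Claim_ definition above) =====
theorem group_by_sprint_py_spec : Claim_equal_group_by_sprint_py := by
  intro items _
  unfold Spec_group_by_sprint_py
  rw [group_list_eq, alt_eq]
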